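-- pv_equiv track=rewrite | github.com/datahub-project/datahub | datahub-integrations-service/src/datahub_integrations/mcp/mcp_server.py | _disable_cloud_fields
-- ===== SOURCE A (Python) =====
-- def _disable_cloud_fields(query: str) -> str:
--     """
--     Disable cloud fields by commenting out lines with #[CLOUD] marker.
--
--     Converts:
--         someField  #[CLOUD]
--     To:
--         # someField  #[CLOUD]
--     """
--     lines = query.split("\n")
--     processed_lines = []
--     for line in lines:
--         if "#[CLOUD]" in line:
--             # Comment out the line by prefixing with #
--             processed_lines.append("# " + line)
--         else:
--             processed_lines.append(line)
--     return "\n".join(processed_lines)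
-- ===== SOURCE B (Python) =====
-- def _disable_cloud_fields(query: str) -> str:
--     # Single forward scan over the characters, buffering the current line;
--     # each line is flushed (commented out if it carries the marker) when a
--     # newline or the end of input is reached.  No split list is materialized.
--     out = []
--     cur = []
--     for ch in query:
--         if ch == "\n":
--             line = "".join(cur)
--             out.append("# " + line if "#[CLOUD]" in line else line)
--             out.append("\n")
--             cur = []
--         else:
--             cur.append(ch)
--     line = "".join(cur)
--     out.append("# " + line if "#[CLOUD]" in line else line)
--     return "".join(out)
-- ===== Notes on version B (the rewrite author's own statement) =====
-- stated objective: alternative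
-- what changed: Replaces A's split-into-lines / per-line loop / join pipeline with a single forward character scan that buffers the current line and flushes it (prefixed with '# ' when it contains the #[CLOUD] marker) at each newline and at end of input.
import Mathlib
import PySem

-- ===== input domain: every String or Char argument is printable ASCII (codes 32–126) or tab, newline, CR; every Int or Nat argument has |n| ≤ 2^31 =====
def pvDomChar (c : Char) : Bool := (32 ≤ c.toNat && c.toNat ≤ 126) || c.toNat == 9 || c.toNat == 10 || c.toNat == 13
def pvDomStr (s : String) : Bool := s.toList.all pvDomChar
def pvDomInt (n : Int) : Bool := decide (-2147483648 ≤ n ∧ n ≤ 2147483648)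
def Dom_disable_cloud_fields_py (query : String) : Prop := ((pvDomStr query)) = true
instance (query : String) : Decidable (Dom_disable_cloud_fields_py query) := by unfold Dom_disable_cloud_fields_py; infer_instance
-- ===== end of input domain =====

-- B replaces A's split('\n')/per-line-loop/join with a single forward character
-- scan buffering the current line (objective: alternative, same cost).

-- ===== PORT A =====
-- the literal "#[CLOUD]" as a char list
def pvMarker : List Char := ['#', '[', 'C', 'L', 'O', 'U', 'D', ']']

-- A: split on "\n", loop appending a (possibly prefixed) copy of each line, join with "\n"
def disable_cloud_fields_py (query : String) : String :=
  String.ofList (PySem.Chars.join ['\n']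
    ((PySem.Chars.splitOn query.toList ['\n']).foldl
      (fun acc line =>
        acc ++ [if PySem.Chars.isIn pvMarker line then '#' :: ' ' :: line else line]) []))

-- ===== PORT B =====
-- flush the buffered line: comment it out iff it contains the marker
def pvFlush (cur : List Char) : List Char :=
  if PySem.Chars.isIn pvMarker cur then '#' :: ' ' :: cur else cur

-- B's scan: one pass over the characters, `cur` is the current-line buffer
def pvScan : List Char → List Char → List Char
  | [], cur => pvFlush cur
  | c :: rest, cur =>
      if c = '\n' then pvFlush cur ++ '\n' :: pvScan rest []
      else pvScan rest (cur ++ [c])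

def disable_cloud_fields_py_alt (query : String) : String :=
  String.ofList (pvScan query.toList [])

-- ===== PRECONDITION & SPEC =====
def Spec_disable_cloud_fields_py (query : String) (out : String) : Prop := out = disable_cloud_fields_py_alt query
instance (query : String) (out : String) : Decidable (Spec_disable_cloud_fields_py query out) := by unfold Spec_disable_cloud_fields_py; infer_instance

-- ===== CLAIM (what is proved, stated in full; the proofs are below) =====
def Claim_equal_disable_cloud_fields_py : Prop := ∀ (query : String), Dom_disable_cloud_fields_py query → Spec_disable_cloud_fields_py query (disable_cloud_fields_py query)

-- ===== LEMMAS AND PROOFS =====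

-- simple recursive characterisation of split on '\n'
def pvSplitNL : List Char → List (List Char)
  | [] => [[]]
  | c :: rest =>
      if c = '\n' then [] :: pvSplitNL rest
      else match pvSplitNL rest with
        | [] => [[c]]
        | p :: ps => (c :: p) :: ps

-- prepend a buffer onto the first piece
def pvConsHead (x : List Char) : List (List Char) → List (List Char)
  | [] => [x]
  | p :: ps => (x ++ p) :: ps

theorem pvSplitNL_ne_nil (cs : List Char) : pvSplitNL cs ≠ [] := by
  cases cs with
  | nil => simp [pvSplitNL]
  | cons c rest =>
    simp only [pvSplitNL]
    split
    · simp
    · cases h : pvSplitNL rest <;> simp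

theorem pvConsHead_nil_of_ne (ps : List (List Char)) (h : ps ≠ []) : pvConsHead [] ps = ps := by
  cases ps with
  | nil => exact absurd rfl h
  | cons p rest => simp [pvConsHead]

theorem pv_go_eq : ∀ (fuel : Nat) (cs cur : List Char) (acc : List (List Char)),
    cs.length < fuel →
    PySem.Chars.splitOn.go ['\n'] fuel cs cur acc = acc.reverse ++ pvConsHead cur.reverse (pvSplitNL cs) := by
  intro fuel
  induction fuel with
  | zero => intro cs cur acc h; omega
  | succ n ih =>
    intro cs cur acc h
    cases cs with
    | nil =>
      rw [PySem.Chars.splitOn.go.eq_def]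
      simp [pvSplitNL, pvConsHead]
    | cons c rest =>
      rw [PySem.Chars.splitOn.go.eq_def]
      simp only [List.isPrefixOf, Bool.and_true]
      by_cases hc : c = '\n'
      · subst hc
        simp only [beq_self_eq_true, if_pos, List.length_cons, List.length_nil,
          List.drop_succ_cons, List.drop_zero]
        rw [ih rest [] (cur.reverse :: acc) (by simpa using Nat.lt_of_succ_lt_succ h)]
        have hne := pvSplitNL_ne_nil rest
        simp only [pvSplitNL, pvConsHead]
        cases hrest : pvSplitNL rest with
        | nil => exact absurd hrest hne
        | cons p ps => simp
      · have : ('\n' == c) = false := by simp [BEq.beq]; exact fun e => hc e.symm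
        simp only [this, Bool.false_eq_true, if_neg, not_false_eq_true]
        rw [ih rest (c :: cur) acc (by simpa using Nat.lt_of_succ_lt_succ h)]
        have hne := pvSplitNL_ne_nil rest
        cases hrest : pvSplitNL rest with
        | nil => exact absurd hrest hne
        | cons p ps => simp [pvSplitNL, hc, hrest, pvConsHead]

theorem pv_splitOn_eq (cs : List Char) : PySem.Chars.splitOn cs ['\n'] = pvSplitNL cs := by
  show PySem.Chars.splitOn.go ['\n'] (cs.length + 1) cs [] [] = _
  rw [pv_go_eq (cs.length + 1) cs [] [] (by omega)]
  simp [pvConsHead_nil_of_ne _ (pvSplitNL_ne_nil cs)]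

theorem pv_foldl_append_map (g : List Char → List Char) :
    ∀ (l : List (List Char)) (acc : List (List Char)),
    l.foldl (fun acc line => acc ++ [g line]) acc = acc ++ l.map g := by
  intro l
  induction l with
  | nil => simp
  | cons x xs ih => intro acc; simp [List.foldl_cons, ih]

theorem pv_scan_eq : ∀ (cs cur : List Char),
    pvScan cs cur = PySem.Chars.join ['\n'] ((pvConsHead cur (pvSplitNL cs)).map pvFlush) := by
  intro cs
  induction cs with
  | nil =>
    intro cur
    simp [pvScan, pvSplitNL, pvConsHead, PySem.Chars.join_singleton]
  | cons c rest ih =>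
    intro cur
    by_cases hc : c = '\n'
    · subst hc
      simp only [pvScan, pvSplitNL, pvConsHead]
      rw [ih []]
      rw [pvConsHead_nil_of_ne _ (pvSplitNL_ne_nil rest)]
      cases hrest : pvSplitNL rest with
      | nil => exact absurd hrest (pvSplitNL_ne_nil rest)
      | cons p ps =>
        simp [List.map_cons, PySem.Chars.join_cons_cons]
    · simp only [pvScan, if_neg hc]
      rw [ih (cur ++ [c])]
      cases hrest : pvSplitNL rest with
      | nil => exact absurd hrest (pvSplitNL_ne_nil rest)
      | cons p ps => simp [pvSplitNL, hc, hrest, pvConsHead]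

-- ===== VERDICT (by name: the statement is the Claim_ definition above) =====
theorem disable_cloud_fields_py_spec : Claim_equal_disable_cloud_fields_py := by
  intro query _
  show _ = _
  unfold disable_cloud_fields_py disable_cloud_fields_py_alt
  congr 1
  rw [pv_scan_eq, pvConsHead_nil_of_ne _ (pvSplitNL_ne_nil query.toList),
    pv_splitOn_eq, pv_foldl_append_map]
  rfl
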